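-- pv_equiv track=rewrite | github.com/RoManInv/ScalablePBETransformation | data/graph.py | group_up
-- ===== SOURCE A (Python) =====
-- def group_up(xis, Ws):
--     xis_dict = dict()
--     Ws_dict = dict()
--
--     for xi, w in zip(xis, Ws):
--         tokidx = xi[0][1]
--         if(tokidx not in xis_dict.keys()):
--             xis_dict[tokidx] = list()
--         if(tokidx not in Ws_dict.keys()):
--             Ws_dict[tokidx] = list()
--
--         xis_dict[tokidx].append(xi)
--         Ws_dict[tokidx].append(w)
--
--     xis_grouped = list()
--     ws_grouped = list()
--
--     for key in xis_dict.keys():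
--         xis_grouped.append(tuple(xis_dict[key]))
--         ws_grouped.append(tuple(Ws_dict[key]))
--
--     return xis_grouped, ws_grouped
-- ===== SOURCE B (Python) =====
-- def group_up(xis, Ws):
--     pairs = list(zip(xis, Ws))
--     keys = list(dict.fromkeys(xi[0][1] for xi, _ in pairs))
--     xis_grouped = [tuple(xi for xi, w in pairs if xi[0][1] == k) for k in keys]
--     ws_grouped = [tuple(w for xi, w in pairs if xi[0][1] == k) for k in keys]
--     return xis_grouped, ws_grouped
-- ===== Notes on version B (the rewrite author's own statement) =====
-- stated objective: alternative
-- what changed: Replaces A's single accumulating pass over two parallel dicts with an index-first build: the ordered distinct token indices are computed once with dict.fromkeys, and each group is produced by a filtering comprehension over the zipped pairs.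
import Mathlib
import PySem

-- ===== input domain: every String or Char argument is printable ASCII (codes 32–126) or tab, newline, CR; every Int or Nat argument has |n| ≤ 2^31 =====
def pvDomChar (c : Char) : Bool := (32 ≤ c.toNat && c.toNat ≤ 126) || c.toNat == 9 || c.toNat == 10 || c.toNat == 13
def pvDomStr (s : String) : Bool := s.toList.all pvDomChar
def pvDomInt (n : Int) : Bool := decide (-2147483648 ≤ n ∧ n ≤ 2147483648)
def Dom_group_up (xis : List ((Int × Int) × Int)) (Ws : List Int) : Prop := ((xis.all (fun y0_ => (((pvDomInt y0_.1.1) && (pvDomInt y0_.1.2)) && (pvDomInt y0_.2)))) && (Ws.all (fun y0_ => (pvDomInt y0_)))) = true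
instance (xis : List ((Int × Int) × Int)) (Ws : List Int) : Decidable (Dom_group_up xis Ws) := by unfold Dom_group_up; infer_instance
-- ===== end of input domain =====

-- B replaces A's single accumulating pass over two parallel dicts with an index-first
-- build (ordered distinct keys via dict.fromkeys, then one filtering scan per key):
-- an alternative decomposition of the same grouping, not claimed faster.


-- ===== PORT A =====
-- the body of A's first loop on one dict: "if tokidx not in d: d[tokidx] = []" then
-- "d[tokidx].append(v)" (append = overwrite with the extended list; exact for dict semantics)
def groupStep {ν : Type} (d : PySem.Dict Int (List ν)) (k : Int) (v : ν) : PySem.Dict Int (List ν) :=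
  let d' := if d.contains k then d else d.insert k []
  d'.insert k (d'.getD k [] ++ [v])

def group_up (xis : List ((Int × Int) × Int)) (Ws : List Int) : (List (List ((Int × Int) × Int))) × List (List Int) :=
  let dicts := (xis.zip Ws).foldl
    (fun (st : PySem.Dict Int (List ((Int × Int) × Int)) × PySem.Dict Int (List Int)) pw =>
      (groupStep st.1 pw.1.1.2 pw.1, groupStep st.2 pw.1.1.2 pw.2))
    (PySem.Dict.empty, PySem.Dict.empty)
  -- second loop: iterate xis_dict.keys, append the looked-up groups (key is present, so
  -- getD equals Python's raising lookup d[key])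
  dicts.1.keys.foldl
    (fun (acc : (List (List ((Int × Int) × Int))) × List (List Int)) key =>
      (acc.1 ++ [dicts.1.getD key []], acc.2 ++ [dicts.2.getD key []]))
    ([], [])

-- ===== PORT B =====
def group_up_alt (xis : List ((Int × Int) × Int)) (Ws : List Int) : (List (List ((Int × Int) × Int))) × List (List Int) :=
  let pairs := xis.zip Ws
  let keys := PySem.List.dedup (pairs.map (fun p => p.1.1.2))
  (keys.map (fun k => (pairs.filter (fun p => p.1.1.2 == k)).map (fun p => p.1)),
   keys.map (fun k => (pairs.filter (fun p => p.1.1.2 == k)).map (fun p => p.2)))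

-- ===== PRECONDITION & SPEC =====
def Spec_group_up (xis : List ((Int × Int) × Int)) (Ws : List Int) (out : (List (List ((Int × Int) × Int))) × List (List Int)) : Prop := out = group_up_alt xis Ws
instance (xis : List ((Int × Int) × Int)) (Ws : List Int) (out : (List (List ((Int × Int) × Int))) × List (List Int)) : Decidable (Spec_group_up xis Ws out) := by unfold Spec_group_up; infer_instance

-- ===== CLAIM (what is proved, stated in full; the proofs are below) =====
def Claim_equal_group_up : Prop := ∀ (xis : List ((Int × Int) × Int)) (Ws : List Int), Dom_group_up xis Ws → Spec_group_up xis Ws (group_up xis Ws)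

-- ===== LEMMAS AND PROOFS =====

-- A's setdefault-then-append step is the modify-with-append step
theorem groupStep_eq_modify {ν : Type} (d : PySem.Dict Int (List ν)) (k : Int) (v : ν) :
    groupStep d k v = d.modify k [] (fun x => x ++ [v]) := by
  unfold groupStep
  by_cases h : d.contains k = true
  · simp only [h, if_true]
    apply PySem.Dict.ext
    simp [PySem.Dict.items_insert_of_contains _ _ h, PySem.Dict.modify]
  · simp only [Bool.not_eq_true] at h
    simp only [h, Bool.false_eq_true, if_false]
    apply PySem.Dict.ext
    have hnk : ∀ p ∈ d.items, p.1 ≠ k := by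
      intro p hp hk
      exact absurd ((PySem.Dict.contains_iff_mem_keys d k).mpr
        (hk ▸ PySem.Dict.mem_keys_of_mem_items d hp)) (by simp [h])
    simp only [PySem.Dict.items_insert_of_not_contains _ _ h,
      PySem.Dict.items_insert_of_contains _ _ (PySem.Dict.contains_insert_self d k ([] : List ν)),
      PySem.Dict.getD_insert_self, PySem.Dict.getD_of_not_contains _ _ h, PySem.Dict.modify, h]
    simp only [List.map_append, List.map_cons, List.map_nil, beq_iff_eq]
    have hmap : List.map (fun p => if p.1 = k then (k, [v]) else p) d.items
        = List.map id d.items := List.map_congr_left (fun p hp => by simp [hnk p hp])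
    simp [hmap]

-- one dict produced by A's first loop, in modify form
theorem fold_groupStep_eq {ν : Type} (l : List (((Int × Int) × Int) × Int)) (val : (((Int × Int) × Int) × Int) → ν)
    (d : PySem.Dict Int (List ν)) :
    l.foldl (fun d p => groupStep d p.1.1.2 (val p)) d
      = l.foldl (fun d p => d.modify p.1.1.2 [] (fun x => x ++ [val p])) d := by
  induction l generalizing d with
  | nil => rfl
  | cons p t ih => simp [List.foldl_cons, groupStep_eq_modify, ih]

theorem getD_fold_modify {ν : Type} (l : List (((Int × Int) × Int) × Int)) (val : (((Int × Int) × Int) × Int) → ν) (c : Int) :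
    (l.foldl (fun d p => d.modify p.1.1.2 [] (fun x => x ++ [val p])) PySem.Dict.empty).getD c []
      = (l.filter (fun p => p.1.1.2 == c)).map val := by
  have h := PySem.Dict.getD_foldl_modify_append (l.map (fun p => (p.1.1.2, val p))) PySem.Dict.empty c
  rw [List.foldl_map] at h
  simpa [List.filter_map, Function.comp] using h

theorem keys_fold_modify {ν : Type} (l : List (((Int × Int) × Int) × Int)) (val : (((Int × Int) × Int) × Int) → ν) :
    (l.foldl (fun d p => d.modify p.1.1.2 [] (fun x => x ++ [val p])) PySem.Dict.empty).keys
      = PySem.List.dedup (l.map (fun p => p.1.1.2)) := by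
  have h := PySem.Dict.keys_foldl_modify_key l (fun p => p.1.1.2) ([] : List ν)
    (fun _ p => fun x => x ++ [val p]) PySem.Dict.empty
  rw [h, PySem.List.dedup_eq_ofList]
  rfl

-- A's second loop builds the two output lists in one pass; as a pair of maps
theorem pairFoldMap {α β γ : Type} (ks : List α) (f : α → β) (g : α → γ) :
    ks.foldl (fun acc k => (acc.1 ++ [f k], acc.2 ++ [g k])) (([], []) : List β × List γ)
      = (ks.map f, ks.map g) := by
  rw [PySem.List.foldl_prod_mk (fun (acc : List β) k => acc ++ [f k]) (fun (acc : List γ) k => acc ++ [g k]),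
    PySem.List.foldl_append_singleton_eq_map, PySem.List.foldl_append_singleton_eq_map]
  simp

-- ===== VERDICT (by name: the statement is the Claim_ definition above) =====
theorem group_up_spec : Claim_equal_group_up := by
  intro xis Ws _
  unfold Spec_group_up group_up group_up_alt
  rw [PySem.List.foldl_prod_mk (fun d (p : (((Int × Int) × Int) × Int)) => groupStep d p.1.1.2 p.1)
        (fun d p => groupStep d p.1.1.2 p.2)]
  rw [fold_groupStep_eq _ (fun p => p.1), fold_groupStep_eq _ (fun p => p.2),
    pairFoldMap, keys_fold_modify]
  dsimp only
  exact Prod.ext (List.map_congr_left (fun k _ => getD_fold_modify _ _ k))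
    (List.map_congr_left (fun k _ => getD_fold_modify _ _ k))
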